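-- pv_equiv track=rewrite | github.com/forksnd/CIA-World-Factbooks-Archive-1990-2025 | etl/stardict/build_stardict.py | _dedup_entries
-- ===== SOURCE A (Python) =====
-- def _dedup_entries(entries):
--     """Merge entries that share the same primary headword.
--
--     This handles rare cases like Serbia 2008 where two Country rows
--     have the same Name but different CountryIDs (due to a code change).
--     """
--     seen = {}  # primary_name -> index in result list
--     result = []
--     for headwords, body in entries:
--         primary = headwords[0]
--         if primary in seen:
--             # Merge: append body to existing entry
--             idx = seen[primary]
--             existing_hw, existing_body = result[idx]
--             merged_body = existing_body + body
--             # Union headwords (keep unique synonyms)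
--             merged_hw = list(existing_hw)
--             for w in headwords:
--                 if w not in merged_hw:
--                     merged_hw.append(w)
--             result[idx] = (merged_hw, merged_body)
--         else:
--             seen[primary] = len(result)
--             result.append((headwords, body))
--     return result
-- ===== SOURCE B (Python) =====
-- def _dedup_entries(entries):
--     # Group entries by primary headword (order-preserving), then reduce each group.
--     groups = {}
--     for headwords, body in entries:
--         groups.setdefault(headwords[0], []).append((headwords, body))
--     result = []
--     for group in groups.values():
--         if len(group) == 1:
--             result.append(group[0])
--         else:
--             first_hw, merged_body = group[0]
--             merged_hw = list(first_hw)
--             for hws, body in group[1:]: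
--                 merged_body = merged_body + body
--                 for w in hws:
--                     if w not in merged_hw:
--                         merged_hw.append(w)
--             result.append((merged_hw, merged_body))
--     return result
-- ===== Notes on version B (the rewrite author's own statement) =====
-- stated objective: simpler
-- what changed: Replaces A's single pass with in-place indexed updates through a primary->index map by a two-pass decomposition: first group entries by primary headword in an order-preserving dict of lists, then reduce each group (singletons emitted unchanged, larger groups folded by body concatenation and headword union).
-- outside the precondition, e.g. on _dedup_entries([([], 'x')]): A raises IndexError, B raises IndexError
import Mathlib
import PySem

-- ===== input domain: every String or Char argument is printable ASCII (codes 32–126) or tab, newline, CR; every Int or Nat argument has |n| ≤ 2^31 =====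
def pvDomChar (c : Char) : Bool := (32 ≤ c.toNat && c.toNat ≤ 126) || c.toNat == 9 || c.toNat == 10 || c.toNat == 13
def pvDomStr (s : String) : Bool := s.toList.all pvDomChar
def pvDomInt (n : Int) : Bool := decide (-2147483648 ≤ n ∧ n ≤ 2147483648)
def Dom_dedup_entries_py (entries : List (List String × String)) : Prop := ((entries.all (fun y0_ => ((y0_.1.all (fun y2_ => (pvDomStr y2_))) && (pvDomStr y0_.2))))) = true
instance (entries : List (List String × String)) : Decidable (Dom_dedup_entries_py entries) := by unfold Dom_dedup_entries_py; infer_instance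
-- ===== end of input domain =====

-- B replaces A's seen-index bookkeeping with an order-preserving group-by-primary-headword pass
-- followed by a second pass reducing each group (objective: simpler decomposition, same cost).

-- ===== PORT A =====
-- the identical inner union loop 'for w in headwords: if w not in merged_hw: merged_hw.append(w)'
-- appearing verbatim in both Pythons
def pvUnionHW (hw : List String) (ws : List String) : List String :=
  ws.foldl (fun acc w => if w ∈ acc then acc else acc ++ [w]) hw

-- A's loop: seen maps a primary headword to an index into result; result[idx] is read with
-- pyGetD and written with List.set idx.toNat — exact here because every stored idx satisfies
-- 0 ≤ idx < result.length (it was len(result) at insertion time)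
def dedupLoopA (seen : PySem.Dict String Int)
    (result : List (List String × String)) :
    List (List String × String) → List (List String × String)
  | [] => result
  | (headwords, body) :: rest =>
    let primary := PySem.List.pyGetD headwords 0 ""
    match seen.get? primary with
    | some idx =>
      let existing := PySem.List.pyGetD result idx ([], "")
      let merged_body := existing.2 ++ body
      let merged_hw := pvUnionHW existing.1 headwords
      dedupLoopA seen (result.set idx.toNat (merged_hw, merged_body)) rest
    | none =>
      dedupLoopA (seen.insert primary (result.length : Int)) (result ++ [(headwords, body)]) rest

def dedup_entries_py (entries : List (List String × String)) : List (List String × String) :=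
  dedupLoopA PySem.Dict.empty [] entries

-- ===== PORT B =====
-- headwords[0] (Pre_ guarantees headwords ≠ [], where Python would raise IndexError)
def pvKey (e : List String × String) : String := PySem.List.pyGetD e.1 0 ""

def pvReduceGroup (g : List (List String × String)) : List String × String :=
  match g with
  | [] => ([], "")  -- unreachable: every group holds at least one entry
  | e :: rest =>
    if rest.isEmpty then e
    else rest.foldl (fun acc f => (pvUnionHW acc.1 f.1, acc.2 ++ f.2)) e

def dedup_entries_py_alt (entries : List (List String × String)) : List (List String × String) :=
  let groups := entries.foldl (fun d e => d.modify (pvKey e) [] (fun g => g ++ [e])) PySem.Dict.empty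
  groups.values.map pvReduceGroup

-- ===== PRECONDITION & SPEC =====
-- Pre_ excludes entries with an empty headword list, on which both Pythons raise IndexError at headwords[0].
def Pre_dedup_entries_py (entries : List (List String × String)) : Prop :=
  ∀ e ∈ entries, e.1 ≠ []
instance (entries : List (List String × String)) : Decidable (Pre_dedup_entries_py entries) := by
  unfold Pre_dedup_entries_py; infer_instance

def pvWitness_dedup_entries_py : (List (List String × String)) :=
  [(["Serbia", "SRB"], "body1"), (["Serbia"], "body2"), (["Kosovo"], "body3")]

def Spec_dedup_entries_py (entries : List (List String × String)) (out : List (List String × String)) : Prop := out = dedup_entries_py_alt entries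
instance (entries : List (List String × String)) (out : List (List String × String)) : Decidable (Spec_dedup_entries_py entries out) := by unfold Spec_dedup_entries_py; infer_instance

-- ===== CLAIM (what is proved, stated in full; the proofs are below) =====
def Claim_equal_dedup_entries_py : Prop := ∀ (entries : List (List String × String)), Dom_dedup_entries_py entries → Pre_dedup_entries_py entries → Spec_dedup_entries_py entries (dedup_entries_py entries)

-- ===== LEMMAS AND PROOFS =====

-- A's reduction of a group: fold the merge step from the group's first element
def pvReduceA (g : List (List String × String)) : List String × String :=
  match g with
  | [] => ([], "")
  | e :: rest => rest.foldl (fun acc f => (pvUnionHW acc.1 f.1, acc.2 ++ f.2)) e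

lemma pvReduceGroup_eq (g : List (List String × String)) :
    pvReduceGroup g = pvReduceA g := by
  cases g with
  | nil => rfl
  | cons e rest => cases rest <;> simp [pvReduceGroup, pvReduceA]

lemma pvReduceA_append (g : List (List String × String)) (hg : g ≠ [])
    (e : List String × String) :
    pvReduceA (g ++ [e]) = (pvUnionHW (pvReduceA g).1 e.1, (pvReduceA g).2 ++ e.2) := by
  obtain ⟨x, xs, rfl⟩ := List.exists_cons_of_ne_nil hg
  simp [pvReduceA, List.foldl_append]

-- setting (ks.map f) at the index of p rewrites f at p only
lemma pvMapSetIdx {β : Type} (ks : List String) (f : String → β) (p : String) (v : β)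
    (hnd : ks.Nodup) (hp : p ∈ ks) :
    (ks.map f).set (ks.idxOf p) v = ks.map (fun k => if k = p then v else f k) := by
  induction ks with
  | nil => cases hp
  | cons a ks ih =>
    by_cases hap : a = p
    · subst hap
      have hnot : a ∉ ks := (List.nodup_cons.mp hnd).1
      simp only [List.idxOf_cons_self, List.map_cons, List.set_cons_zero]
      congr 1
      exact (List.map_congr_left (fun k hk => by
        have : k ≠ a := fun h => hnot (h ▸ hk)
        simp [this])).symm
    · have hp' : p ∈ ks := by
        cases hp with
        | head => exact absurd rfl hap
        | tail _ h => exact h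
      have hidx : (a :: ks).idxOf p = ks.idxOf p + 1 := by
        simp [hap]
      simp only [List.map_cons, hidx, List.set_cons_succ,
        ih (List.nodup_cons.mp hnd).2 hp']
      rw [if_neg hap]

-- reading (ks.map f) at the index of p gives f p
lemma pvMapGetIdx {β : Type} [Inhabited β] (ks : List String) (f : String → β) (p : String)
    (hp : p ∈ ks) (d : β) :
    PySem.List.pyGetD (ks.map f) ((ks.idxOf p : Nat) : Int) d = f p := by
  rw [PySem.List.pyGetD_natCast]
  have hlt : ks.idxOf p < ks.length := List.idxOf_lt_length_of_mem hp
  rw [List.getD_eq_getElem _ _ (by simpa using hlt)]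
  simp [List.getElem_map, List.getElem_idxOf]

-- characterisation of A's loop: from a state described by an ordered key list ks and
-- a per-key accumulated group g, it computes the per-key reduction of the extended groups
lemma pvLoopAChar :
    ∀ (rest : List (List String × String)) (ks : List String)
      (seen : PySem.Dict String Int) (g : String → List (List String × String)),
      ks.Nodup →
      (∀ k, seen.get? k = if k ∈ ks then some ((ks.idxOf k : Nat) : Int) else none) →
      (∀ k, k ∉ ks → g k = []) →
      (∀ k ∈ ks, g k ≠ []) →
      dedupLoopA seen (ks.map (fun k => pvReduceA (g k))) rest
        = (PySem.Set.update ks (rest.map pvKey)).map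
            (fun k => pvReduceA (g k ++ rest.filter (fun e => pvKey e == k))) := by
  intro rest
  induction rest with
  | nil => intro ks seen g _ _ _ _; simp [dedupLoopA, PySem.Set.update_nil]
  | cons e rest ih =>
    intro ks seen g hnd hseen hout hin
    obtain ⟨hws, body⟩ := e
    have hkey : pvKey (hws, body) = PySem.List.pyGetD hws 0 "" := rfl
    set p := PySem.List.pyGetD hws 0 "" with hp
    by_cases hmem : p ∈ ks
    · -- merge into the existing entry
      have hget : seen.get? p = some ((ks.idxOf p : Nat) : Int) := by
        rw [hseen]; simp [hmem]
      have hstep :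
          dedupLoopA seen (ks.map (fun k => pvReduceA (g k))) ((hws, body) :: rest)
            = dedupLoopA seen
                ((ks.map (fun k => pvReduceA (g k))).set (ks.idxOf p)
                  (pvUnionHW (pvReduceA (g p)).1 hws, (pvReduceA (g p)).2 ++ body)) rest := by
        simp only [dedupLoopA, ← hp, hget]
        rw [pvMapGetIdx ks _ p hmem]
        simp only [Int.toNat_natCast]
      rw [hstep, pvMapSetIdx ks _ p _ hnd hmem]
      have hmapeq :
          (fun k => if k = p then (pvUnionHW (pvReduceA (g p)).1 hws, (pvReduceA (g p)).2 ++ body)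
                    else pvReduceA (g k))
            = fun k => pvReduceA ((fun k => if k = p then g p ++ [(hws, body)] else g k) k) := by
        funext k
        by_cases hk : k = p
        · have := pvReduceA_append (g p) (hin p hmem) (hws, body)
          simp [hk, this]
        · simp [hk]
      rw [hmapeq,
        ih ks seen (fun k => if k = p then g p ++ [(hws, body)] else g k) hnd hseen
          (fun k hk => by
            have : k ≠ p := fun h => hk (h ▸ hmem)
            simp [this, hout k hk])
          (fun k hk => by
            by_cases h : k = p
            · subst h; simp
            · simp [h, hin k hk])]
      have hupd : PySem.Set.update ks (((hws, body) :: rest).map pvKey)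
          = PySem.Set.update ks (rest.map pvKey) := by
        rw [List.map_cons, PySem.Set.update_cons, PySem.Set.add_of_mem (by rwa [hkey])]
      rw [hupd]
      apply List.map_congr_left
      intro k _
      by_cases hk : k = p
      · subst hk
        simp [hkey, List.append_assoc]
      · have : ¬ (pvKey (hws, body) == k) = true := by
          simp [hkey]; exact fun h => hk h.symm
        simp [this, hk]
    · -- fresh primary: append
      have hget : seen.get? p = none := by rw [hseen]; simp [hmem]
      have hmap2 : (ks ++ [p]).map (fun k =>
            pvReduceA ((fun k => if k = p then [(hws, body)] else g k) k))
          = ks.map (fun k => pvReduceA (g k)) ++ [(hws, body)] := by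
        rw [List.map_append]
        congr 1
        · apply List.map_congr_left
          intro k hk
          have : k ≠ p := fun h => hmem (h ▸ hk)
          simp [this]
        · simp [pvReduceA]
      have hstep :
          dedupLoopA seen (ks.map (fun k => pvReduceA (g k))) ((hws, body) :: rest)
            = dedupLoopA (seen.insert p (ks.length : Int))
                (ks.map (fun k => pvReduceA (g k)) ++ [(hws, body)]) rest := by
        simp only [dedupLoopA, ← hp, hget, List.length_map]
      have hnodup2 : (ks ++ [p]).Nodup := by
        simp only [List.nodup_append, hnd, List.nodup_singleton, true_and]
        intro a ha b hb hab
        rw [List.mem_singleton] at hb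
        subst hb
        exact hmem (by rwa [hab] at ha)
      rw [hstep, ← hmap2,
        ih (ks ++ [p]) (seen.insert p (ks.length : Int))
          (fun k => if k = p then [(hws, body)] else g k)
          hnodup2
          (fun k => by
            rw [PySem.Dict.get?_insert]
            by_cases hk : k = p
            · subst hk
              simp [List.idxOf_append_of_notMem hmem, List.idxOf_cons_self]
            · rw [if_neg hk, hseen k]
              by_cases hks : k ∈ ks
              · simp [hks, List.idxOf_append_of_mem hks]
              · simp [hks, hk]
          )
          (fun k hk => by
            have hk' : k ∉ ks ∧ k ≠ p := by
              simp only [List.mem_append, List.mem_singleton] at hk; tauto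
            simp [hk'.2, hout k hk'.1])
          (fun k hk => by
            by_cases h : k = p
            · subst h; simp
            · simp only [List.mem_append, List.mem_singleton] at hk
              have : k ∈ ks := by tauto
              simp [h, hin k this])]
      have hupd : PySem.Set.update ks (((hws, body) :: rest).map pvKey)
          = PySem.Set.update (ks ++ [p]) (rest.map pvKey) := by
        rw [List.map_cons, PySem.Set.update_cons, PySem.Set.add_of_not_mem (by rwa [hkey])]
        rfl
      rw [hupd]
      apply List.map_congr_left
      intro k _
      by_cases hk : k = p
      · subst hk
        simp [hkey, hout _ hmem]
      · have : ¬ (pvKey (hws, body) == k) = true := by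
          simp [hkey]; exact fun h => hk h.symm
        simp [this, hk]

-- A computes the per-key reduction over the first-occurrence-ordered primary headwords
lemma pvACharacter (entries : List (List String × String)) :
    dedup_entries_py entries
      = (PySem.Set.ofList (entries.map pvKey)).map
          (fun k => pvReduceA (entries.filter (fun e => pvKey e == k))) := by
  have h := pvLoopAChar entries [] PySem.Dict.empty (fun _ => [])
    List.nodup_nil (fun k => by simp [PySem.Dict.get?_empty]) (fun _ _ => rfl)
    (fun k hk => absurd hk (List.not_mem_nil))
  simpa [dedup_entries_py, PySem.Set.update_nil_left] using h

-- B computes the same per-key reduction (via the grouping dict)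
lemma pvBCharacter (entries : List (List String × String)) :
    dedup_entries_py_alt entries
      = (PySem.Set.ofList (entries.map pvKey)).map
          (fun k => pvReduceA (entries.filter (fun e => pvKey e == k))) := by
  have hfold :
      entries.foldl (fun d e => d.modify (pvKey e) [] (fun g => g ++ [e])) PySem.Dict.empty
        = (entries.map (fun e => (pvKey e, e))).foldl
            (fun d p => d.modify p.1 [] (fun g => g ++ [p.2])) PySem.Dict.empty := by
    rw [List.foldl_map]
  have hnd : (entries.foldl (fun d e => d.modify (pvKey e) [] (fun g => g ++ [e]))
      PySem.Dict.empty).keys.Nodup :=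
    PySem.Dict.nodup_keys_foldl_modify_key entries pvKey []
      (fun _ e => fun g => g ++ [e]) PySem.Dict.empty (by simp [PySem.Dict.keys_empty])
  have hkeys : (entries.foldl (fun d e => d.modify (pvKey e) [] (fun g => g ++ [e]))
      PySem.Dict.empty).keys = PySem.Set.ofList (entries.map pvKey) := by
    rw [PySem.Dict.keys_foldl_modify_key, PySem.Dict.keys_empty, PySem.Set.update_nil_left]
  have hgetD : ∀ k, (entries.foldl (fun d e => d.modify (pvKey e) [] (fun g => g ++ [e]))
      PySem.Dict.empty).getD k [] = entries.filter (fun e => pvKey e == k) := by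
    intro k
    rw [hfold, PySem.Dict.getD_foldl_modify_append, PySem.Dict.getD_empty, List.filter_map]
    simp [Function.comp_def]
  show (entries.foldl (fun d e => d.modify (pvKey e) [] (fun g => g ++ [e]))
      PySem.Dict.empty).values.map pvReduceGroup = _
  rw [PySem.Dict.values_eq_map_keys _ hnd [], hkeys, List.map_map]
  apply List.map_congr_left
  intro k _
  simp only [Function.comp_apply, hgetD k, pvReduceGroup_eq]

-- ===== VERDICT (by name: the statement is the Claim_ definition above) =====
theorem dedup_entries_py_spec : Claim_equal_dedup_entries_py := by
  intro entries _ _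
  unfold Spec_dedup_entries_py
  rw [pvACharacter, pvBCharacter]
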